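-- pv_equiv track=rewrite | github.com/ljramones/mcp_sensebank | sense_ingest_docs.py | _summarize_cats
-- ===== SOURCE A (Python) =====
-- from typing import Dict, List, Tuple
--
-- def _summarize_cats(d: Dict[str, int]) -> str:
--     """
--     Summarizes the given categories in a predefined order and includes any additional
--     categories not defined in the order. The resulting summary is a comma-separated
--     string with each category and its associated value.
--
--     :param d: Dictionary of categories (str) with their associated integer values.
--     :type d: Dict[str, int]
--     :return: A string summarizing the categories and their values.
--     :rtype: str
--     """
--     if not d: return "-"
--     order = ["smell","sound","taste","touch","sight"]
--     parts = [f"{k}:{d.get(k,0)}" for k in order if k in d or d.get(k,0)]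
--     # add any other stray categories
--     for k,v in d.items():
--         if k not in order:
--             parts.append(f"{k}:{v}")
--     return ", ".join(parts) if parts else "-"
-- ===== SOURCE B (Python) =====
-- def _summarize_cats(d):
--     if not d:
--         return "-"
--     order = ["smell", "sound", "taste", "touch", "sight"]
--     idx = {name: i for i, name in enumerate(order)}
--     items = sorted(d.items(), key=lambda kv: idx.get(kv[0], len(order)))
--     return ", ".join(f"{k}:{v}" for k, v in items)
-- ===== Notes on version B (the rewrite author's own statement) =====
-- stated objective: alternative
-- what changed: Replaces the two-pass build (scan the order list collecting present keys, then rescan the dict for strays) by a priority index plus one stable sort of the items, whose tie-breaking reproduces insertion order for stray keys.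
import Mathlib
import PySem

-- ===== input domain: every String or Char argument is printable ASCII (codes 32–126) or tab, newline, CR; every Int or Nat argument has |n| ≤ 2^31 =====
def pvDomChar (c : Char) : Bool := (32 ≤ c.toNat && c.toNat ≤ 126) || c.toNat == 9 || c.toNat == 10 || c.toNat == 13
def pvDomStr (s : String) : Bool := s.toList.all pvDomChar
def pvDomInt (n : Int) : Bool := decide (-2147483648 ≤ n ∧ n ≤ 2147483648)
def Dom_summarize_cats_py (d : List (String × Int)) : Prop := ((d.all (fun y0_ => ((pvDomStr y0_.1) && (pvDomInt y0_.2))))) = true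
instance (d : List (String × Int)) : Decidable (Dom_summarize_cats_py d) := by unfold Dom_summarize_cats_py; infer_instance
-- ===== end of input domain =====

-- B replaces A's two-pass build (scan the fixed order list, then rescan for stray keys)
-- by a priority index and one stable sort of the items; same result, an alternative decomposition.

-- ===== PORT A =====
-- first-match lookup with default, as Python's dict.get on the association list
def pvGetD (d : List (String × Int)) (k : String) (dflt : Int) : Int :=
  match d with
  | [] => dflt
  | (k', v) :: rest => if k' == k then v else pvGetD rest k dflt

def pvContains (d : List (String × Int)) (k : String) : Bool :=
  match d with
  | [] => false
  | (k', _) :: rest => k' == k || pvContains rest k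

def summarize_cats_py (d : List (String × Int)) : String :=
  if d = [] then "-"
  else
    let order : List String := ["smell", "sound", "taste", "touch", "sight"]
    let parts : List String :=
      (order.filter (fun k => pvContains d k || !(pvGetD d k 0 == 0))).map
        (fun k => k ++ ":" ++ PySem.Int.toStr (pvGetD d k 0))
    let parts : List String :=
      d.foldl (fun ps kv =>
        if order.contains kv.1 then ps
        else ps ++ [kv.1 ++ ":" ++ PySem.Int.toStr kv.2]) parts
    if parts = [] then "-" else PySem.Str.join ", " parts

-- ===== PORT B =====
def summarize_cats_py_alt (d : List (String × Int)) : String :=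
  if d = [] then "-"
  else
    let order : List String := ["smell", "sound", "taste", "touch", "sight"]
    let idx : PySem.Dict String Int :=
      PySem.Dict.ofList ((PySem.List.enumerate order).map (fun p => (p.2, p.1)))
    let items :=
      PySem.List.sorted d (fun kv => PySem.Dict.getD idx kv.1 (PySem.List.len order)) false
    PySem.Str.join ", " (items.map (fun kv => kv.1 ++ ":" ++ PySem.Int.toStr kv.2))

-- ===== PRECONDITION & SPEC =====
-- Pre_ requires distinct keys: the Python argument is a dict, which can never hold duplicate
-- keys, so association lists with a repeated key correspond to no input of A at all.
def Pre_summarize_cats_py (d : List (String × Int)) : Prop := (d.map Prod.fst).Nodup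
instance (d : List (String × Int)) : Decidable (Pre_summarize_cats_py d) := by
  unfold Pre_summarize_cats_py; infer_instance

def pvWitness_summarize_cats_py : (List (String × Int)) := [("smell", 2), ("xyz", 0)]

def Spec_summarize_cats_py (d : List (String × Int)) (out : String) : Prop := out = summarize_cats_py_alt d
instance (d : List (String × Int)) (out : String) : Decidable (Spec_summarize_cats_py d out) := by unfold Spec_summarize_cats_py; infer_instance

-- ===== CLAIM (what is proved, stated in full; the proofs are below) =====
def Claim_equal_summarize_cats_py : Prop := ∀ (d : List (String × Int)), Dom_summarize_cats_py d → Pre_summarize_cats_py d → Spec_summarize_cats_py d (summarize_cats_py d)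

-- ===== LEMMAS AND PROOFS =====

-- the priority B's index dict assigns to a key
def pvPrio (k : String) : Int :=
  if k == "smell" then 0 else if k == "sound" then 1 else if k == "taste" then 2
  else if k == "touch" then 3 else if k == "sight" then 4 else 5

-- bucket i of the priority sort
def pvF (i : Int) (d : List (String × Int)) : List (String × Int) :=
  d.filter (fun kv => pvPrio kv.1 == i)

set_option maxRecDepth 8000 in
lemma key_eq (k : String) :
    PySem.Dict.getD
      (PySem.Dict.ofList ((PySem.List.enumerate ["smell", "sound", "taste", "touch", "sight"]).map
        (fun p => (p.2, p.1)))) k (PySem.List.len ["smell", "sound", "taste", "touch", "sight"])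
      = pvPrio k := by
  have h : (PySem.Dict.ofList ((PySem.List.enumerate ["smell", "sound", "taste", "touch", "sight"]).map
        (fun p => (p.2, p.1)))) = PySem.Dict.mk [("smell",0),("sound",1),("taste",2),("touch",3),("sight",4)] := by
    decide
  rw [h]
  simp only [PySem.Dict.getD, PySem.Dict.get?_mk_cons, PySem.List.len, pvPrio]
  split_ifs <;> simp_all [PySem.Dict.get?]


lemma prio_cases (k : String) :
    pvPrio k = 0 ∨ pvPrio k = 1 ∨ pvPrio k = 2 ∨ pvPrio k = 3 ∨ pvPrio k = 4 ∨ pvPrio k = 5 := by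
  unfold pvPrio; split_ifs <;> simp

lemma mem_pvF {y : String × Int} {i : Int} {d : List (String × Int)} (h : y ∈ pvF i d) :
    pvPrio y.1 = i := by
  unfold pvF at h
  have := (List.mem_filter.mp h).2
  simpa using this

lemma insertBy_skip {α : Type} (before : α → α → Bool) (x : α) (l1 l2 : List α)
    (h1 : ∀ y ∈ l1, before x y = false) :
    PySem.List.insertBy before x (l1 ++ l2) = l1 ++ PySem.List.insertBy before x l2 := by
  induction l1 with
  | nil => simp
  | cons a t ih =>
    simp only [List.cons_append, PySem.List.insertBy, h1 a (List.mem_cons_self),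
      Bool.false_eq_true, if_false]
    rw [ih (fun y hy => h1 y (List.mem_cons_of_mem _ hy))]

lemma insertBy_front {α : Type} (before : α → α → Bool) (x : α) (l : List α)
    (h : ∀ y ∈ l, before x y = true) :
    PySem.List.insertBy before x l = x :: l := by
  cases l with
  | nil => rfl
  | cons y ys => simp [PySem.List.insertBy, h y (List.mem_cons_self)]

lemma pvF_append_singleton (i : Int) (xs : List (String × Int)) (x : String × Int) :
    pvF i (xs ++ [x]) = pvF i xs ++ (if pvPrio x.1 = i then [x] else []) := by
  unfold pvF
  rw [List.filter_append]
  congr 1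
  by_cases h : pvPrio x.1 = i <;> simp [h]

lemma skipF {x y : String × Int} {i j : Int} {xs : List (String × Int)}
    (hy : y ∈ pvF i xs) (hx : pvPrio x.1 = j) (hij : i ≤ j) :
    decide (pvPrio x.1 < pvPrio y.1) = false := by
  rw [hx, mem_pvF hy]; simp; omega

lemma frontF {x y : String × Int} {i j : Int} {xs : List (String × Int)}
    (hy : y ∈ pvF i xs) (hx : pvPrio x.1 = j) (hij : j < i) :
    decide (pvPrio x.1 < pvPrio y.1) = true := by
  rw [hx, mem_pvF hy]; simp; omega

lemma insertBy_last {α : Type} (before : α → α → Bool) (x : α) (l : List α)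
    (h : ∀ y ∈ l, before x y = false) :
    PySem.List.insertBy before x l = l ++ [x] := by
  induction l with
  | nil => rfl
  | cons y ys ih =>
    simp only [PySem.List.insertBy, h y (List.mem_cons_self), Bool.false_eq_true, if_false,
      List.cons_append]
    rw [ih (fun z hz => h z (List.mem_cons_of_mem _ hz))]

lemma sorted_buckets (d : List (String × Int)) :
    PySem.List.sorted d (fun kv => pvPrio kv.1) false =
      pvF 0 d ++ (pvF 1 d ++ (pvF 2 d ++ (pvF 3 d ++ (pvF 4 d ++ pvF 5 d)))) := by
  rw [PySem.List.sorted_eq_foldl_insertBy]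
  induction d using List.reverseRecOn with
  | nil => rfl
  | append_singleton xs x ih =>
    rw [List.foldl_append, List.foldl_cons, List.foldl_nil, ih]
    simp only [pvF_append_singleton]
    rcases prio_cases x.1 with hj | hj | hj | hj | hj | hj
    · rw [insertBy_skip _ _ _ _ (fun y hy => skipF hy hj (by omega)),
      insertBy_front _ _ _ (by
        intro y hy
        simp only [List.mem_append] at hy
        rcases hy with h|h|h|h|h <;> exact frontF h hj (by omega))]
      simp [hj]
    · rw [insertBy_skip _ _ _ _ (fun y hy => skipF hy hj (by omega)),
      insertBy_skip _ _ _ _ (fun y hy => skipF hy hj (by omega)),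
      insertBy_front _ _ _ (by
        intro y hy
        simp only [List.mem_append] at hy
        rcases hy with h|h|h|h <;> exact frontF h hj (by omega))]
      simp [hj]
    · rw [insertBy_skip _ _ _ _ (fun y hy => skipF hy hj (by omega)),
      insertBy_skip _ _ _ _ (fun y hy => skipF hy hj (by omega)),
      insertBy_skip _ _ _ _ (fun y hy => skipF hy hj (by omega)),
      insertBy_front _ _ _ (by
        intro y hy
        simp only [List.mem_append] at hy
        rcases hy with h|h|h <;> exact frontF h hj (by omega))]
      simp [hj]
    · rw [insertBy_skip _ _ _ _ (fun y hy => skipF hy hj (by omega)),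
      insertBy_skip _ _ _ _ (fun y hy => skipF hy hj (by omega)),
      insertBy_skip _ _ _ _ (fun y hy => skipF hy hj (by omega)),
      insertBy_skip _ _ _ _ (fun y hy => skipF hy hj (by omega)),
      insertBy_front _ _ _ (by
        intro y hy
        simp only [List.mem_append] at hy
        rcases hy with h|h <;> exact frontF h hj (by omega))]
      simp [hj]
    · rw [insertBy_skip _ _ _ _ (fun y hy => skipF hy hj (by omega)),
      insertBy_skip _ _ _ _ (fun y hy => skipF hy hj (by omega)),
      insertBy_skip _ _ _ _ (fun y hy => skipF hy hj (by omega)),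
      insertBy_skip _ _ _ _ (fun y hy => skipF hy hj (by omega)),
      insertBy_skip _ _ _ _ (fun y hy => skipF hy hj (by omega)),
      insertBy_front _ _ _ (fun y hy => frontF hy hj (by omega))]
      simp [hj]
    · rw [insertBy_skip _ _ _ _ (fun y hy => skipF hy hj (by omega)),
      insertBy_skip _ _ _ _ (fun y hy => skipF hy hj (by omega)),
      insertBy_skip _ _ _ _ (fun y hy => skipF hy hj (by omega)),
      insertBy_skip _ _ _ _ (fun y hy => skipF hy hj (by omega)),
      insertBy_skip _ _ _ _ (fun y hy => skipF hy hj (by omega)),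
      insertBy_last _ _ _ (fun y hy => skipF hy hj (by omega))]
      simp [hj]

lemma prio0 (k : String) : (pvPrio k == 0) = (k == "smell") := by
  unfold pvPrio; split_ifs <;> simp_all
lemma prio1 (k : String) : (pvPrio k == 1) = (k == "sound") := by
  unfold pvPrio; split_ifs <;> simp_all
lemma prio2 (k : String) : (pvPrio k == 2) = (k == "taste") := by
  unfold pvPrio; split_ifs <;> simp_all
lemma prio3 (k : String) : (pvPrio k == 3) = (k == "touch") := by
  unfold pvPrio; split_ifs <;> simp_all
lemma prio4 (k : String) : (pvPrio k == 4) = (k == "sight") := by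
  unfold pvPrio; split_ifs <;> simp_all
lemma prio5 (k : String) :
    (pvPrio k == 5) = !(["smell", "sound", "taste", "touch", "sight"].contains k) := by
  unfold pvPrio; split_ifs <;> simp_all

lemma getD_not_contains (d : List (String × Int)) (k : String) (h : pvContains d k = false) :
    pvGetD d k 0 = 0 := by
  induction d with
  | nil => rfl
  | cons a t ih =>
    obtain ⟨k', v⟩ := a
    simp [pvContains] at h
    simp [pvGetD, h.1, ih h.2]

lemma contains_iff (d : List (String × Int)) (k : String) :
    pvContains d k = true ↔ k ∈ d.map Prod.fst := by
  induction d with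
  | nil => simp [pvContains]
  | cons a t ih =>
    obtain ⟨k', v⟩ := a
    simp only [pvContains, Bool.or_eq_true, beq_iff_eq, ih, List.map_cons, List.mem_cons]
    exact or_congr eq_comm Iff.rfl

lemma filter_key (d : List (String × Int)) (k : String) (h : (d.map Prod.fst).Nodup) :
    d.filter (fun kv => kv.1 == k) =
      if pvContains d k then [(k, pvGetD d k 0)] else [] := by
  induction d with
  | nil => simp [pvContains]
  | cons a t ih =>
    obtain ⟨k', v⟩ := a
    simp only [List.map_cons, List.nodup_cons] at h
    by_cases hk : k' = k
    · subst hk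
      have ht : pvContains t k' = false := by
        by_contra hc
        exact h.1 ((contains_iff t k').mp (by simpa using hc))
      have : t.filter (fun kv => kv.1 == k') = [] := by
        rw [ih h.2, ht]; rfl
      simp [pvContains, pvGetD, this]
    · simp [pvContains, pvGetD, hk, ih h.2]

lemma stray_foldl (c : String × Int → Bool) (g : String × Int → String)
    (d : List (String × Int)) (acc : List String) :
    d.foldl (fun ps kv => if c kv then ps else ps ++ [g kv]) acc =
      acc ++ (d.filter (fun kv => !c kv)).map g := by
  induction d generalizing acc with
  | nil => simp
  | cons a t ih =>
    by_cases h : c a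
    · simp [List.foldl_cons, h, ih]
    · simp [List.foldl_cons, h, ih]

lemma cond_eq (d : List (String × Int)) (k : String) :
    (pvContains d k || !(pvGetD d k 0 == 0)) = pvContains d k := by
  cases hc : pvContains d k
  · simp [getD_not_contains d k hc]
  · simp

lemma parts_eq (d : List (String × Int)) (h : (d.map Prod.fst).Nodup) :
    (((["smell", "sound", "taste", "touch", "sight"] : List String).filter
        (fun k => pvContains d k || !(pvGetD d k 0 == 0))).map
        (fun k => k ++ ":" ++ PySem.Int.toStr (pvGetD d k 0)))
      ++ (d.filter (fun kv => !(["smell", "sound", "taste", "touch", "sight"].contains kv.1))).map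
          (fun kv => kv.1 ++ ":" ++ PySem.Int.toStr kv.2) =
    (pvF 0 d ++ (pvF 1 d ++ (pvF 2 d ++ (pvF 3 d ++ (pvF 4 d ++ pvF 5 d))))).map
      (fun kv => kv.1 ++ ":" ++ PySem.Int.toStr kv.2) := by
  have hF : ∀ (i : Int) (ks : String), (∀ k : String, (pvPrio k == i) = (k == ks)) →
      pvF i d = if pvContains d ks then [(ks, pvGetD d ks 0)] else [] := by
    intro i ks hiff
    unfold pvF
    rw [List.filter_congr (fun kv _ => hiff kv.1), filter_key d ks h]
  have h0 := hF 0 "smell" prio0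
  have h1 := hF 1 "sound" prio1
  have h2 := hF 2 "taste" prio2
  have h3 := hF 3 "touch" prio3
  have h4 := hF 4 "sight" prio4
  have h5 : pvF 5 d =
      d.filter (fun kv => !(["smell", "sound", "taste", "touch", "sight"].contains kv.1)) := by
    unfold pvF
    exact List.filter_congr (fun kv _ => prio5 kv.1)
  rw [List.filter_congr (fun k _ => cond_eq d k)]
  simp only [List.map_append, h0, h1, h2, h3, h4, h5, List.filter]
  by_cases c0 : pvContains d "smell" <;> by_cases c1 : pvContains d "sound" <;>
    by_cases c2 : pvContains d "taste" <;> by_cases c3 : pvContains d "touch" <;>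
    by_cases c4 : pvContains d "sight" <;>
    simp [c0, c1, c2, c3, c4]

-- ===== VERDICT (by name: the statement is the Claim_ definition above) =====
theorem summarize_cats_py_spec : Claim_equal_summarize_cats_py := by
  intro d _ hpre
  unfold Spec_summarize_cats_py summarize_cats_py summarize_cats_py_alt
  by_cases hd : d = []
  · simp [hd]
  · rw [if_neg hd, if_neg hd]
    dsimp only
    have hkey : (fun kv : String × Int =>
        PySem.Dict.getD
          (PySem.Dict.ofList ((PySem.List.enumerate ["smell", "sound", "taste", "touch", "sight"]).map
            (fun p => (p.2, p.1)))) kv.1 (PySem.List.len ["smell", "sound", "taste", "touch", "sight"]))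
        = (fun kv : String × Int => pvPrio kv.1) := funext fun kv => key_eq kv.1
    rw [hkey, sorted_buckets, stray_foldl, parts_eq d hpre]
    rw [if_neg ?_]
    intro hnil
    apply hd
    rw [← sorted_buckets d] at hnil
    have := (PySem.List.sorted_eq_nil_iff d (fun kv => pvPrio kv.1) false).mp (by
      have := List.map_eq_nil_iff.mp hnil
      exact this)
    exact this
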